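-- pv_equiv track=rewrite | github.com/Crongbaby/Programmers | LV1/LV1_크레인 인형 뽑기(2019 카카오 개발자 겨울 인턴십).py | solution
-- ===== SOURCE A (Python) =====
-- def solution(board, moves): #와...한번에 풀었따 ㅎ히힣.
--   # 화면 : "1 x 1" 크기의 칸들로 이루어진 "N x N" 크기의 정사각 격자
--   # 각 격자 칸에는 다양한 인형이 들어 있으며 인형이 없는 칸은 빈칸
--   # 모든 인형은 "1 x 1" 크기의 격자 한 칸을 차지하며 격자의 가장 아래 칸부터 차곡차곡 쌓여 있음
--   # 게임 사용자는 크레인을 좌우로 움직여서 멈춘 위치에서 가장 위에 있는 인형을 집어 올릴 수 있음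
--   # 집어 올린 인형은 바구니에 쌓이게 되는 데, 이때 바구니의 가장 아래 칸부터 인형이 순서대로 쌓이게 됨
--   # 만약 같은 모양의 인형 두 개가 바구니에 연속해서 쌓이게 되면 두 인형은 터뜨려지면서 바구니에서 사라지게 됨
--   # 만약 인형이 없는 곳에서 크레인을 작동시키는 경우에는 아무런 일도 일어나지 않음
--   # board 배열은 2차원 배열로 크기는 "5 x 5" 이상 "30 x 30" 이하
--   # board의 각 칸에는 0 이상 100 이하인 정수가 담김
--
--   # board에서 0이 아닌 가장 위에 있는 숫자 꺼내오기.
--   # moves에서 나온 숫자 - 1 = 인덱스(열)해서 가장 위에 있는 숫자 꺼내오기...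
--   # stack으로 풀어야할거 같은데
--   # 위 아래가 같은 숫자면 카운트하고 삭제하기
--
--   stack = []
--   count = 0
--
--   for doll in range(len(moves)):
--     for rows in range(len(board)):
--
--       if(board[rows][moves[doll]-1] != 0):
--         stack.append(board[rows][moves[doll]-1])
--         board[rows][moves[doll]-1] = 0 #바구니로 나간거 표시
--         break
--
--     if (len(stack) >=2 and stack[-2] == stack[-1]):
--       stack.pop()
--       stack.pop()
--       count = count + 2
--
--   return count
-- ===== SOURCE B (Python) =====
-- # Return-value equivalence only: A zeroes popped board cells in place; B does not mutate board.
-- def solution(board, moves):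
--     width = len(board[0]) if board else 0
--     # per-column stacks, topmost doll last
--     stacks = [[row[c] for row in reversed(board) if row[c] != 0] for c in range(width)]
--     basket = []
--     count = 0
--     for m in moves:
--         s = stacks[m - 1]
--         if s:
--             basket.append(s.pop())
--         if len(basket) >= 2 and basket[-2] == basket[-1]:
--             basket.pop()
--             basket.pop()
--             count += 2
--     return count
-- ===== Notes on version B (the rewrite author's own statement) =====
-- stated objective: faster
-- what changed: B builds each column's stack of nonzero dolls once up front and pops from it in O(1) per move, instead of A's rescan of the board's rows from the top on every move; B does not mutate the board (equivalence is on the return value).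
-- outside the precondition, e.g. on solution([], [1]): A returns 0, B raises IndexError; on solution([[1, 2], [3]], [1]): A returns 0, B raises IndexError
import Mathlib
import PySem

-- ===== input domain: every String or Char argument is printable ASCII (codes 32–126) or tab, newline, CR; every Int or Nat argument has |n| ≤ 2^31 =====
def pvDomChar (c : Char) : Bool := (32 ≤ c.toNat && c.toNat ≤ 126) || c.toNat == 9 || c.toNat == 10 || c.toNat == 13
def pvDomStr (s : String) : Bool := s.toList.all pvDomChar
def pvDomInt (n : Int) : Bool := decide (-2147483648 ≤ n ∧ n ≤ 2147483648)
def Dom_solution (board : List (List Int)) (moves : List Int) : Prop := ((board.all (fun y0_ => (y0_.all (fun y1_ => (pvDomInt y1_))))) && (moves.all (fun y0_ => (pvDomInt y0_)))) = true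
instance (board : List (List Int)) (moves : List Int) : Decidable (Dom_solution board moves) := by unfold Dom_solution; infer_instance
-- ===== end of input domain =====

-- B replaces A's per-move top-down board rescans by per-column stks built once (return value only:
-- A zeroes popped board cells in place, B does not mutate the board).

-- ===== PORT A =====
-- inner 'for rows in range(len(board))' with break: scan rows, pop first nonzero cell at column j
def aScan : List (List Int) → Int → List (List Int) × Option Int
  | [], _ => ([], none)
  | row :: rest, j =>
    let v := PySem.List.pyGetD row j 0
    if v ≠ 0 then
      (PySem.List.pySetD row j 0 :: rest, some v)
    else
      let r := aScan rest j
      (row :: r.1, r.2)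

def aStep (st : List (List Int) × List Int × Int) (m : Int) : List (List Int) × List Int × Int :=
  let r := aScan st.1 (m - 1)
  let stack : List Int := match r.2 with
    | some v => st.2.1 ++ [v]
    | none => st.2.1
  if 2 ≤ stack.length ∧ PySem.List.pyGetD stack (-2) 0 = PySem.List.pyGetD stack (-1) 0 then
    (r.1, stack.dropLast.dropLast, st.2.2 + 2)
  else
    (r.1, stack, st.2.2)

def solution (board : List (List Int)) (moves : List Int) : Int :=
  (moves.foldl aStep (board, ([], 0))).2.2

-- ===== PORT B =====
-- [row[c] for row in reversed(board) if row[c] != 0]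
def bCol (board : List (List Int)) (c : Int) : List Int :=
  board.reverse.filterMap (fun row =>
    let v := PySem.List.pyGetD row c 0
    if v ≠ 0 then some v else none)

def bStep (st : List (List Int) × List Int × Int) (m : Int) : List (List Int) × List Int × Int :=
  let s := PySem.List.pyGetD st.1 (m - 1) []
  let st1 : List (List Int) × List Int × Int :=
    if s = [] then st
    else (PySem.List.pySetD st.1 (m - 1) s.dropLast, st.2.1 ++ [s.getLast?.getD 0], st.2.2)
  if 2 ≤ st1.2.1.length ∧ PySem.List.pyGetD st1.2.1 (-2) 0 = PySem.List.pyGetD st1.2.1 (-1) 0 then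
    (st1.1, st1.2.1.dropLast.dropLast, st1.2.2 + 2)
  else
    st1

def solution_alt (board : List (List Int)) (moves : List Int) : Int :=
  let width := (board.head?.getD []).length
  let stks := (List.range width).map (fun c => bCol board (Int.ofNat c))
  (moves.foldl bStep (stks, ([], 0))).2.2

-- ===== PRECONDITION & SPEC =====
-- Pre_ excludes ragged or empty boards (with nonempty moves) and out-of-range moves — outside the
-- problem's rectangular-board domain — where A may raise IndexError mid-scan or return a value that
-- depends on which rows a partial scan happened to touch, and where B's stack construction raises.
def Pre_solution (board : List (List Int)) (moves : List Int) : Prop :=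
  (∀ row ∈ board, row.length = (board.head?.getD []).length) ∧
  (moves = [] ∨ (board ≠ [] ∧ ∀ m ∈ moves,
    -((board.head?.getD []).length : Int) ≤ m - 1 ∧ m - 1 < ((board.head?.getD []).length : Int)))
instance (board : List (List Int)) (moves : List Int) : Decidable (Pre_solution board moves) := by
  unfold Pre_solution; infer_instance

def pvWitness_solution : List (List Int) × List Int :=
  ([[0, 1, 0], [2, 1, 3], [2, 4, 3]], [1, 1, 2, 3, 3])

def Spec_solution (board : List (List Int)) (moves : List Int) (out : Int) : Prop := out = solution_alt board moves
instance (board : List (List Int)) (moves : List Int) (out : Int) : Decidable (Spec_solution board moves out) := by unfold Spec_solution; infer_instance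

-- ===== CLAIM (what is proved, stated in full; the proofs are below) =====
def Claim_equal_solution : Prop := ∀ (board : List (List Int)) (moves : List Int), Dom_solution board moves → Pre_solution board moves → Spec_solution board moves (solution board moves)

-- ===== LEMMAS AND PROOFS =====

-- Python index resolution on a list of known length: in-range j resolves to (j+len if j<0 else j)
lemma pyIdx_inrange (n : Nat) (j : Int) (h1 : -(n : Int) ≤ j) (h2 : j < (n : Int)) :
    PySem.List.pyIdx? n j = some (j + if j < 0 then (n : Int) else 0).toNat := by
  unfold PySem.List.pyIdx?
  split_ifs <;> (try congr 1) <;> omega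

lemma pyGetD_inrange {α : Type} (xs : List α) (j : Int) (d : α)
    (h1 : -(xs.length : Int) ≤ j) (h2 : j < (xs.length : Int)) :
    PySem.List.pyGetD xs j d = xs.getD (j + if j < 0 then (xs.length : Int) else 0).toNat d := by
  unfold PySem.List.pyGetD PySem.List.pyGet?
  rw [pyIdx_inrange _ _ h1 h2]
  simp [List.getD_eq_getElem?_getD]

lemma pySetD_inrange {α : Type} (xs : List α) (j : Int) (v : α)
    (h1 : -(xs.length : Int) ≤ j) (h2 : j < (xs.length : Int)) :
    PySem.List.pySetD xs j v = xs.set (j + if j < 0 then (xs.length : Int) else 0).toNat v := by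
  unfold PySem.List.pySetD PySem.List.pySet?
  rw [pyIdx_inrange _ _ h1 h2]
  rfl

lemma pyGetD_res {α : Type} (xs : List α) (W : Nat) (j : Int) (d : α)
    (hl : xs.length = W) (h1 : -(W : Int) ≤ j) (h2 : j < (W : Int)) :
    PySem.List.pyGetD xs j d = xs.getD (j + if j < 0 then (W : Int) else 0).toNat d := by
  subst hl; exact pyGetD_inrange xs j d h1 h2

lemma pySetD_res {α : Type} (xs : List α) (W : Nat) (j : Int) (v : α)
    (hl : xs.length = W) (h1 : -(W : Int) ≤ j) (h2 : j < (W : Int)) :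
    PySem.List.pySetD xs j v = xs.set (j + if j < 0 then (W : Int) else 0).toNat v := by
  subst hl; exact pySetD_inrange xs j v h1 h2

-- column c of a board, bottom-up nonzero entries, Nat index form
def colN (board : List (List Int)) (c : Nat) : List Int :=
  board.reverse.filterMap (fun row => if row.getD c 0 ≠ 0 then some (row.getD c 0) else none)

lemma bCol_natCast (board : List (List Int)) (c : Nat) : bCol board (Int.ofNat c) = colN board c := by
  simp [bCol, colN, Int.ofNat_eq_natCast]

lemma colN_cons (row : List Int) (rest : List (List Int)) (c : Nat) :
    colN (row :: rest) c = colN rest c ++ (if row.getD c 0 ≠ 0 then [row.getD c 0] else []) := by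
  simp only [colN, List.reverse_cons, List.filterMap_append, List.filterMap_cons,
    List.filterMap_nil]
  split_ifs <;> simp

lemma aScan_spec (bd : List (List Int)) (j : Int) (W jn : Nat)
    (hrect : ∀ row ∈ bd, row.length = W) (hjn : jn < W)
    (hres : (j + if j < 0 then (W : Int) else 0).toNat = jn)
    (hr1 : -(W : Int) ≤ j) (hr2 : j < (W : Int)) :
    (∀ row ∈ (aScan bd j).1, row.length = W) ∧
    (aScan bd j).2 = (colN bd jn).getLast? ∧
    colN (aScan bd j).1 jn = (colN bd jn).dropLast ∧
    (∀ c : Nat, c ≠ jn → colN (aScan bd j).1 c = colN bd c) := by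
  induction bd with
  | nil => simp [aScan, colN]
  | cons row rest ih =>
    have hrow : row.length = W := hrect row (by simp)
    have hget : PySem.List.pyGetD row j 0 = row.getD jn 0 := by
      rw [pyGetD_inrange row j 0 (by rw [hrow]; exact hr1) (by rw [hrow]; exact_mod_cast hr2),
        hrow, hres]
    have hset : PySem.List.pySetD row j (0 : Int) = row.set jn 0 := by
      rw [pySetD_inrange row j 0 (by rw [hrow]; exact hr1) (by rw [hrow]; exact_mod_cast hr2),
        hrow, hres]
    have ihr := ih (fun r hr => hrect r (by simp [hr]))
    by_cases hv : row.getD jn 0 = 0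
    · have hv2 : row[jn]?.getD 0 = (0 : Int) := by simpa [List.getD_eq_getElem?_getD] using hv
      have hstep : aScan (row :: rest) j = (row :: (aScan rest j).1, (aScan rest j).2) := by
        simp [aScan, hget, List.getD_eq_getElem?_getD, hv2]
      refine ⟨?_, ?_, ?_, ?_⟩
      · intro r hr
        rw [hstep] at hr
        rcases List.mem_cons.mp hr with h | h
        · rw [h]; exact hrow
        · exact ihr.1 r h
      · rw [hstep]
        simp only []
        rw [ihr.2.1, colN_cons, if_neg (not_not_intro hv)]
        simp
      · rw [hstep, colN_cons, colN_cons, ihr.2.2.1, if_neg (not_not_intro hv)]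
        simp
      · intro c hc
        rw [hstep, colN_cons, colN_cons, ihr.2.2.2 c hc]
    · have hv2 : ¬ row[jn]?.getD 0 = (0 : Int) := by
        simpa [List.getD_eq_getElem?_getD] using hv
      have hstep : aScan (row :: rest) j = (row.set jn 0 :: rest, some (row.getD jn 0)) := by
        simp [aScan, hget, hset, List.getD_eq_getElem?_getD, hv2]
      have hjr : jn < row.length := by omega
      have hsetget : (row.set jn 0).getD jn 0 = 0 := by
        rw [List.getD_eq_getElem _ _ (by simpa using hjr)]
        simp
      have hsetne : ∀ c : Nat, c ≠ jn → (row.set jn 0).getD c 0 = row.getD c 0 := by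
        intro c hc
        simp [List.getD, List.getElem?_set_ne (fun h => hc h.symm)]
      refine ⟨?_, ?_, ?_, ?_⟩
      · intro r hr
        rw [hstep] at hr
        rcases List.mem_cons.mp hr with h | h
        · rw [h]; simpa using hrow
        · exact hrect r (by simp [h])
      · rw [hstep, colN_cons, if_pos hv]
        simp
      · rw [hstep, colN_cons, colN_cons, hsetget, if_pos hv]
        simp
      · intro c hc
        rw [hstep, colN_cons, colN_cons, hsetne c hc]

def Good (W : Nat) (stA stB : List (List Int) × List Int × Int) : Prop :=
  (∀ row ∈ stA.1, row.length = W) ∧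
  stB.1 = (List.range W).map (fun c => colN stA.1 c) ∧
  stA.2.1 = stB.2.1 ∧ stA.2.2 = stB.2.2

lemma step_good (W : Nat) (stA stB : List (List Int) × List Int × Int) (m : Int)
    (hg : Good W stA stB) (hm1 : -(W : Int) ≤ m - 1) (hm2 : m - 1 < (W : Int)) :
    Good W (aStep stA m) (bStep stB m) := by
  obtain ⟨bd, stack, cnt⟩ := stA
  obtain ⟨stks, stack, cnt⟩ := stB
  obtain ⟨hrect, hstks, hstack, hcnt⟩ := hg
  dsimp only at hrect hstks hstack hcnt
  subst hstks; subst hstack; subst hcnt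
  have hw : 0 < W := by omega
  have hjn : (m - 1 + if m - 1 < 0 then (W : Int) else 0).toNat < W := by
    split_ifs <;> omega
  obtain ⟨hA1, hA2, hA3, hA4⟩ :=
    aScan_spec bd (m - 1) W (m - 1 + if m - 1 < 0 then (W : Int) else 0).toNat hrect hjn rfl hm1 hm2
  have hlen : ((List.range W).map (fun c => colN bd c)).length = W := by simp
  have hs : PySem.List.pyGetD ((List.range W).map (fun c => colN bd c)) (m - 1) []
      = colN bd (m - 1 + if m - 1 < 0 then (W : Int) else 0).toNat := by
    rw [pyGetD_res _ W _ _ hlen hm1 hm2, List.getD_eq_getElem _ _ (by simpa using hjn)]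
    simp
  by_cases hcol : colN bd (m - 1 + if m - 1 < 0 then (W : Int) else 0).toNat = []
  · have hA2' : (aScan bd (m - 1)).2 = none := by rw [hA2, hcol]; rfl
    have hmap : (List.range W).map (fun c => colN (aScan bd (m - 1)).1 c)
        = (List.range W).map (fun c => colN bd c) := by
      apply List.map_congr_left
      intro c hc
      by_cases hcj : c = (m - 1 + if m - 1 < 0 then (W : Int) else 0).toNat
      · rw [hcj, hA3, hcol]; rfl
      · exact hA4 c hcj
    have hB : bStep ((List.range W).map (fun c => colN bd c), stack, cnt) m
        = (if 2 ≤ stack.length ∧ PySem.List.pyGetD stack (-2) 0 = PySem.List.pyGetD stack (-1) 0 then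
            ((List.range W).map (fun c => colN bd c), stack.dropLast.dropLast, cnt + 2)
          else ((List.range W).map (fun c => colN bd c), stack, cnt)) := by
      simp only [bStep, hs, hcol]
      simp
    have hA : aStep (bd, stack, cnt) m
        = (if 2 ≤ stack.length ∧ PySem.List.pyGetD stack (-2) 0 = PySem.List.pyGetD stack (-1) 0 then
            ((aScan bd (m - 1)).1, stack.dropLast.dropLast, cnt + 2)
          else ((aScan bd (m - 1)).1, stack, cnt)) := by
      simp only [aStep, hA2']
    rw [hA, hB]
    split_ifs with hcond
    · exact ⟨hA1, hmap.symm, rfl, rfl⟩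
    · exact ⟨hA1, hmap.symm, rfl, rfl⟩
  · obtain ⟨l, hl⟩ : ∃ l, (colN bd (m - 1 + if m - 1 < 0 then (W : Int) else 0).toNat).getLast? = some l :=
      Option.ne_none_iff_exists'.mp (by simpa [List.getLast?_eq_none_iff] using hcol)
    have hA2' : (aScan bd (m - 1)).2 = some l := by rw [hA2, hl]
    have hset : PySem.List.pySetD ((List.range W).map (fun c => colN bd c)) (m - 1)
          ((colN bd (m - 1 + if m - 1 < 0 then (W : Int) else 0).toNat).dropLast)
        = ((List.range W).map (fun c => colN bd c)).set
            (m - 1 + if m - 1 < 0 then (W : Int) else 0).toNat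
            ((colN bd (m - 1 + if m - 1 < 0 then (W : Int) else 0).toNat).dropLast) :=
      pySetD_res _ W _ _ hlen hm1 hm2
    have hmap : ((List.range W).map (fun c => colN bd c)).set
          (m - 1 + if m - 1 < 0 then (W : Int) else 0).toNat
          ((colN bd (m - 1 + if m - 1 < 0 then (W : Int) else 0).toNat).dropLast)
        = (List.range W).map (fun c => colN (aScan bd (m - 1)).1 c) := by
      apply List.ext_getElem (by simp)
      intro i h1 h2
      simp only [List.getElem_set, List.getElem_map, List.getElem_range]
      by_cases hcj : i = (m - 1 + if m - 1 < 0 then (W : Int) else 0).toNat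
      · rw [if_pos hcj.symm, hcj, hA3]
      · rw [if_neg (fun h => hcj h.symm), (hA4 i hcj)]
    have hB : bStep ((List.range W).map (fun c => colN bd c), stack, cnt) m
        = (if 2 ≤ (stack ++ [l]).length ∧
              PySem.List.pyGetD (stack ++ [l]) (-2) 0 = PySem.List.pyGetD (stack ++ [l]) (-1) 0 then
            ((List.range W).map (fun c => colN (aScan bd (m - 1)).1 c),
              (stack ++ [l]).dropLast.dropLast, cnt + 2)
          else ((List.range W).map (fun c => colN (aScan bd (m - 1)).1 c), stack ++ [l], cnt)) := by
      simp only [bStep, hs, if_neg hcol, hset, hmap, hl]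
      rfl
    have hA : aStep (bd, stack, cnt) m
        = (if 2 ≤ (stack ++ [l]).length ∧
              PySem.List.pyGetD (stack ++ [l]) (-2) 0 = PySem.List.pyGetD (stack ++ [l]) (-1) 0 then
            ((aScan bd (m - 1)).1, (stack ++ [l]).dropLast.dropLast, cnt + 2)
          else ((aScan bd (m - 1)).1, stack ++ [l], cnt)) := by
      simp only [aStep, hA2']
    rw [hA, hB]
    split_ifs with hcond
    · exact ⟨hA1, rfl, rfl, rfl⟩
    · exact ⟨hA1, rfl, rfl, rfl⟩

lemma fold_good (W : Nat) (moves : List Int) (stA stB : List (List Int) × List Int × Int)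
    (hg : Good W stA stB)
    (hmv : ∀ m ∈ moves, -(W : Int) ≤ m - 1 ∧ m - 1 < (W : Int)) :
    (moves.foldl aStep stA).2.2 = (moves.foldl bStep stB).2.2 := by
  induction moves generalizing stA stB with
  | nil => exact hg.2.2.2
  | cons m ms ih =>
    exact ih _ _ (step_good W stA stB m hg (hmv m (by simp)).1 (hmv m (by simp)).2)
      (fun x hx => hmv x (by simp [hx]))

-- ===== VERDICT (by name: the statement is the Claim_ definition above) =====
theorem solution_spec : Claim_equal_solution := by
  intro board moves _ hpre
  unfold Spec_solution solution solution_alt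
  rcases hpre with ⟨hrect, hmv | ⟨hne, hmv⟩⟩
  · subst hmv; simp
  · have hinit : (List.range (board.head?.getD []).length).map (fun c => bCol board (Int.ofNat c))
        = (List.range (board.head?.getD []).length).map (fun c => colN board c) := by
      simp only [bCol_natCast]
    show (moves.foldl aStep (board, ([], 0))).2.2
        = (moves.foldl bStep ((List.range (board.head?.getD []).length).map
            (fun c => bCol board (Int.ofNat c)), ([], 0))).2.2
    rw [hinit]
    exact fold_good (board.head?.getD []).length moves (board, ([], 0))
      ((List.range (board.head?.getD []).length).map (fun c => colN board c), ([], 0))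
      ⟨hrect, rfl, rfl, rfl⟩ hmv
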